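-- pv_equiv track=rewrite | github.com/TCReaper/Computing | Computing Worksheets '18/TERM 2/7 Encryption/encryption.py | k2denary
-- ===== SOURCE A (Python) =====
-- def k2denary(element,k):
--       #0-9 is 48-57
--       #A-Z is 65-90
--       output = 0
--       element = str(element)
--       for i in range(len(element)):
--             power = int(len(element) - 1 - i)
--             i = element[i]
--             if i.isalpha():
--                   i = ord(i) - 55
--             output += int(i) * (int(k)**power)
--       return output
-- ===== SOURCE B (Python) =====
-- def k2denary(element, k):
--     # Horner's method: one multiply-add per character instead of recomputing k**power each step.
--     element = str(element)
--     output = 0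
--     for ch in element:
--         output = output * k + (ord(ch) - 55 if ch.isalpha() else int(ch))
--     return output
-- ===== Notes on version B (the rewrite author's own statement) =====
-- stated objective: faster
-- what changed: Replaces the per-digit recomputation of k**power (positional-weight sum) by Horner's rule, one multiply-add per character.
import Mathlib
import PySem

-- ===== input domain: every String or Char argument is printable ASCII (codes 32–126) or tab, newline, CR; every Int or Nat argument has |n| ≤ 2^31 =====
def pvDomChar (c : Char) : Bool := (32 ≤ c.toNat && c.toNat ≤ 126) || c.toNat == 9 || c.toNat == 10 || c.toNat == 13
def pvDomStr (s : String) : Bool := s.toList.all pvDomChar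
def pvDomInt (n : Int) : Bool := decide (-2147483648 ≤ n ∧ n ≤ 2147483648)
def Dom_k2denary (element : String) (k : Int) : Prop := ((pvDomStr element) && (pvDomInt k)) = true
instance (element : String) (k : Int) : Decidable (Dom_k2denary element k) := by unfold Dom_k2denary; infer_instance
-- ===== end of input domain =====

-- B replaces A's positional-weight sum (k**power recomputed per digit) by Horner's rule for speed.


-- ===== PORT A =====
-- digit value of one character: ord(c)-55 if c.isalpha() else int(c)
-- (int(c) raises ValueError on non-digit chars; the none case is excluded by Pre_, getD 0 is never the value used)
def pvDigit (c : Char) : Int :=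
  if PySem.Chars.isalpha c then (c.toNat : Int) - 55
  else (PySem.Int.ofChars? [c]).getD 0

-- A: for i in range(len(element)): output += digit(element[i]) * k**(len-1-i)
-- (index i is always in range, so pyGetD with a dummy default is exact)
def k2denary (element : String) (k : Int) : Int :=
  let el := element.toList
  (PySem.List.pyRange 0 el.length 1).foldl
    (fun output i =>
      let power : Int := (el.length : Int) - 1 - i
      let c := PySem.List.pyGetD el i ' '
      output + pvDigit c * k ^ power.toNat) 0

-- ===== PORT B =====
-- B: Horner's rule, output = output*k + digit(ch) over the characters
def k2denary_alt (element : String) (k : Int) : Int :=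
  element.toList.foldl (fun output c => output * k + pvDigit c) 0

-- ===== PRECONDITION & SPEC =====
-- Pre_ excludes exactly the inputs on which Python A raises ValueError (int(c) on a
-- character that is neither a digit nor a letter); B raises there too.
def Pre_k2denary (element : String) (k : Int) : Prop :=
  element.toList.all (fun c => PySem.Chars.isalpha c || PySem.Chars.isdigit c) = true
instance (element : String) (k : Int) : Decidable (Pre_k2denary element k) := by
  unfold Pre_k2denary; infer_instance
def pvWitness_k2denary : String × Int := ("1A", 16)

def Spec_k2denary (element : String) (k : Int) (out : Int) : Prop := out = k2denary_alt element k
instance (element : String) (k : Int) (out : Int) : Decidable (Spec_k2denary element k out) := by unfold Spec_k2denary; infer_instance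

-- ===== CLAIM (what is proved, stated in full; the proofs are below) =====
def Claim_equal_k2denary : Prop := ∀ (element : String) (k : Int), Dom_k2denary element k → Pre_k2denary element k → Spec_k2denary element k (k2denary element k)

-- ===== LEMMAS AND PROOFS =====

-- Horner fold with a nonzero accumulator: the accumulator is scaled by k^length.
theorem horner_shift (k : Int) (l : List Char) (a : Int) :
    l.foldl (fun output c => output * k + pvDigit c) a
      = a * k ^ l.length + l.foldl (fun output c => output * k + pvDigit c) 0 := by
  induction l generalizing a with
  | nil => simp
  | cons c rest ih =>
    simp only [List.foldl_cons, List.length_cons]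
    rw [ih (a * k + pvDigit c), ih (0 * k + pvDigit c)]
    ring

-- A's indexed fold over enumerate, generalised: starting index s, total length n.
theorem a_fold_enum (k : Int) (n : Int) :
    ∀ (l : List Char) (s acc : Int), 0 ≤ s → s + l.length ≤ n →
    (PySem.List.enumerate l s).foldl
        (fun output p => output + pvDigit p.2 * k ^ (n - 1 - p.1).toNat) acc
      = acc + (l.foldl (fun output c => output * k + pvDigit c) 0)
              * k ^ (n - s - l.length).toNat := by
  intro l
  induction l with
  | nil => intro s acc _ _; simp [PySem.List.enumerate_nil]
  | cons c rest ih =>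
    intro s acc hs hn
    rw [PySem.List.enumerate_cons, List.foldl_cons, List.foldl_cons,
        ih (s + 1) _ (by omega) (by simp only [List.length_cons] at hn; push_cast at hn ⊢; omega),
        horner_shift k rest (0 * k + pvDigit c)]
    simp only [List.length_cons] at hn
    have h1 : (n - 1 - s).toNat = rest.length + (n - (s + 1) - rest.length).toNat := by
      push_cast at hn; omega
    have h2 : (n - s - ((c :: rest).length : Int)).toNat
        = (n - (s + 1) - (rest.length : Int)).toNat := by
      simp only [List.length_cons]; push_cast; push_cast at hn; omega
    rw [h1, h2, pow_add]
    ring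

theorem k2denary_eq (element : String) (k : Int) :
    k2denary element k = k2denary_alt element k := by
  show (PySem.List.pyRange 0 (element.toList.length : Int) 1).foldl
      (fun output i =>
        output + pvDigit (PySem.List.pyGetD element.toList i ' ')
          * k ^ ((element.toList.length : Int) - 1 - i).toNat) 0
    = element.toList.foldl (fun output c => output * k + pvDigit c) 0
  have he := PySem.List.enumerate_eq_map_pyRange (xs := element.toList) (d := ' ')
  simp only [PySem.List.len_eq] at he
  rw [← List.foldl_map
        (f := fun j : Int => (j, PySem.List.pyGetD element.toList j ' '))
        (g := fun output p => output + pvDigit p.2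
          * k ^ ((element.toList.length : Int) - 1 - p.1).toNat),
      ← he,
      a_fold_enum k (element.toList.length : Int) element.toList 0 0 le_rfl (by simp)]
  simp

-- ===== VERDICT (by name: the statement is the Claim_ definition above) =====
theorem k2denary_spec : Claim_equal_k2denary := by
  intro element k _ _
  unfold Spec_k2denary
  exact k2denary_eq element k
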